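-- pv_equiv track=rewrite | github.com/ChrisRG/AOC2021 | aoc2021/day_2.py | calculate_aim
-- ===== SOURCE A (Python) =====
-- from typing import List
--
-- def parse_line(line: str) -> List[int]:
--     """
--     Given a string containing a direction and amount, e.g. 'forward 10',
--     returns a pair of integers
--     """
--     match line.split():
--         case ["forward", amount]:
--             return [int(amount), 0]
--         case ["down", amount]:
--             return [0, int(amount)]
--         case ["up", amount]:
--             return [0, -int(amount)]
--         case _:
--             return [0, 0]
--
-- def calculate_aim(data: List[str]) -> tuple[int, int]:
--     """
--     For each line, calculate vertical change based on product of given horizontal amount and cumulative aim.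
--     Update total horizontal and aim amounts.
--     Return the pair of horizontal and vertical changes.
--     """
--     horiz = 0
--     vert = 0
--     aim = 0
--     for line in map(parse_line, data):
--         vert += line[0] * aim
--         horiz += line[0]
--         aim += line[1]
--     return (horiz, vert)
-- ===== SOURCE B (Python) =====
-- from itertools import accumulate
-- from typing import List
--
-- def parse_line(line: str) -> List[int]:
--     match line.split():
--         case ["forward", amount]:
--             return [int(amount), 0]
--         case ["down", amount]:
--             return [0, int(amount)]
--         case ["up", amount]:
--             return [0, -int(amount)]
--         case _:
--             return [0, 0]
--
-- def calculate_aim(data: List[str]) -> tuple: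
--     parsed = [parse_line(line) for line in data]
--     amounts = [p[0] for p in parsed]
--     deltas = [p[1] for p in parsed]
--     aims = accumulate(deltas)
--     return (sum(amounts), sum(a * c for a, c in zip(amounts, aims)))
-- ===== Notes on version B (the rewrite author's own statement) =====
-- stated objective: alternative
-- what changed: Replaces the fused three-accumulator loop with a map/split into amounts and aim-deltas, a prefix-sum (itertools.accumulate) of the deltas, and a separate weighted zip-sum; correct because forward lines carry zero aim delta, so inclusive prefix aims coincide with the loop's pre-update aim wherever the amount is nonzero.
import Mathlib
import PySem

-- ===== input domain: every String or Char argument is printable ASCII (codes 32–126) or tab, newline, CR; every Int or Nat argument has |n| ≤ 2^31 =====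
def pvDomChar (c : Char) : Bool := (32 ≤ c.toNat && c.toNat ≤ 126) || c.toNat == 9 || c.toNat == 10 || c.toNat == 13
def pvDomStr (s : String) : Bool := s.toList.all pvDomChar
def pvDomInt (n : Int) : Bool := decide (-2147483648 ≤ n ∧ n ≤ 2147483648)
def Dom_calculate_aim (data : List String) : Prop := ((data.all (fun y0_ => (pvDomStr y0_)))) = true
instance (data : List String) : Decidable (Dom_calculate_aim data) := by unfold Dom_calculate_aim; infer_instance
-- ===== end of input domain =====

-- B replaces A's fused three-accumulator loop by a split into amounts/deltas, a prefix-sum of the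
-- deltas, and a separate weighted zip-sum (objective: alternative decomposition, same O(n) cost).

-- ===== PORT A =====
-- parse_line: 'none' exactly where Python's int(amount) raises ValueError
def parse_line (line : String) : Option (List Int) :=
  match PySem.Str.split₀ line with
  | ["forward", amount] => (PySem.Int.ofStr? amount).map (fun n => [n, 0])
  | ["down", amount] => (PySem.Int.ofStr? amount).map (fun n => [0, n])
  | ["up", amount] => (PySem.Int.ofStr? amount).map (fun n => [0, -n])
  | _ => some [0, 0]

def calculate_aim (data : List String) : Int × Int :=
  let r := data.foldl (fun (s : Int × Int × Int) l =>
    let line := (parse_line l).getD [0, 0]   -- default never used inside Pre_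
    (s.1 + PySem.List.pyGetD line 0 0,
     s.2.1 + PySem.List.pyGetD line 0 0 * s.2.2,
     s.2.2 + PySem.List.pyGetD line 1 0)) (0, 0, 0)
  (r.1, r.2.1)

-- ===== PORT B =====
-- itertools.accumulate over Int
def pyAccumulate (xs : List Int) : List Int :=
  (xs.foldl (fun (s : List Int × Int) d => (s.1 ++ [s.2 + d], s.2 + d)) ([], 0)).1

def calculate_aim_alt (data : List String) : Int × Int :=
  let parsed := data.map (fun l => (parse_line l).getD [0, 0])
  let amounts := parsed.map (fun p => PySem.List.pyGetD p 0 0)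
  let deltas := parsed.map (fun p => PySem.List.pyGetD p 1 0)
  let aims := pyAccumulate deltas
  (amounts.sum, ((amounts.zip aims).map (fun x => x.1 * x.2)).sum)

-- ===== PRECONDITION & SPEC =====
-- Pre_ excludes exactly the inputs on which Python A raises ValueError: a line that split()s to
-- ["forward"/"down"/"up", amount] with amount not a valid int literal.
def lineOk (line : String) : Bool :=
  match PySem.Str.split₀ line with
  | [d, a] =>
      if d == "forward" || d == "down" || d == "up" then (PySem.Int.ofStr? a).isSome else true
  | _ => true

def Pre_calculate_aim (data : List String) : Prop := ∀ l ∈ data, lineOk l = true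
instance (data : List String) : Decidable (Pre_calculate_aim data) := by
  unfold Pre_calculate_aim; infer_instance

def pvWitness_calculate_aim : List String := ["forward 5", "down 3", "up 1", "forward 2"]

def Spec_calculate_aim (data : List String) (out : Int × Int) : Prop := out = calculate_aim_alt data
instance (data : List String) (out : Int × Int) : Decidable (Spec_calculate_aim data out) := by
  unfold Spec_calculate_aim; infer_instance

-- ===== CLAIM (what is proved, stated in full; the proofs are below) =====
def Claim_equal_calculate_aim : Prop := ∀ (data : List String), Dom_calculate_aim data → Pre_calculate_aim data → Spec_calculate_aim data (calculate_aim data)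

-- ===== LEMMAS AND PROOFS =====

-- the (amount, delta) pair a line contributes
def pairOf (l : String) : Int × Int :=
  let p := (parse_line l).getD [0, 0]
  (PySem.List.pyGetD p 0 0, PySem.List.pyGetD p 1 0)

-- in every parsed pair, at least one component is 0
theorem pairOf_mul (l : String) : (pairOf l).1 * (pairOf l).2 = 0 := by
  unfold pairOf parse_line
  split
  · cases PySem.Int.ofStr? _ <;> simp [PySem.List.pyGetD]
  · cases PySem.Int.ofStr? _ <;> simp [PySem.List.pyGetD]
  · cases PySem.Int.ofStr? _ <;> simp [PySem.List.pyGetD]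
  · simp [PySem.List.pyGetD]

-- tail scan (inclusive prefix sums)
def scanT (c : Int) : List Int → List Int
  | [] => []
  | d :: ds => (c + d) :: scanT (c + d) ds

theorem pyAccumulate_spec (xs : List Int) (acc : List Int) (c : Int) :
    xs.foldl (fun (s : List Int × Int) d => (s.1 ++ [s.2 + d], s.2 + d)) (acc, c)
      = (acc ++ scanT c xs, c + xs.sum) := by
  induction xs generalizing acc c with
  | nil => simp [scanT]
  | cons d ds ih => simp [scanT, ih, add_assoc]

-- weighted sums: wE uses the aim BEFORE the current delta, wI after
def wE (c : Int) : List (Int × Int) → Int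
  | [] => 0
  | p :: ps => p.1 * c + wE (c + p.2) ps

def wI (c : Int) : List (Int × Int) → Int
  | [] => 0
  | p :: ps => p.1 * (c + p.2) + wI (c + p.2) ps

theorem wE_eq_wI (ps : List (Int × Int)) (c : Int) (h : ∀ p ∈ ps, p.1 * p.2 = 0) :
    wE c ps = wI c ps := by
  induction ps generalizing c with
  | nil => rfl
  | cons p ps ih =>
      have hp : p.1 * p.2 = 0 := h p (List.mem_cons_self ..)
      simp only [wE, wI, mul_add, hp, add_zero]
      rw [ih _ (fun q hq => h q (List.mem_cons_of_mem _ hq))]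

theorem foldA_spec (ls : List String) (h v a : Int) :
    ls.foldl (fun (s : Int × Int × Int) l =>
        let line := (parse_line l).getD [0, 0]
        (s.1 + PySem.List.pyGetD line 0 0,
         s.2.1 + PySem.List.pyGetD line 0 0 * s.2.2,
         s.2.2 + PySem.List.pyGetD line 1 0)) (h, v, a)
      = (h + ((ls.map pairOf).map Prod.fst).sum,
         v + wE a (ls.map pairOf),
         a + ((ls.map pairOf).map Prod.snd).sum) := by
  induction ls generalizing h v a with
  | nil => simp [wE]
  | cons l ls ih =>
      simp only [List.foldl_cons, List.map_cons, List.sum_cons, wE, ih]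
      refine Prod.ext ?_ (Prod.ext ?_ ?_) <;> simp [pairOf] <;> ring

theorem zipSum_spec (ps : List (Int × Int)) (c : Int) :
    (((ps.map Prod.fst).zip (scanT c (ps.map Prod.snd))).map (fun x => x.1 * x.2)).sum
      = wI c ps := by
  induction ps generalizing c with
  | nil => rfl
  | cons p ps ih => simp [scanT, wI, ih]

-- ===== VERDICT (by name: the statement is the Claim_ definition above) =====
theorem calculate_aim_spec : Claim_equal_calculate_aim := by
  intro data _ _
  unfold Spec_calculate_aim calculate_aim calculate_aim_alt pyAccumulate
  dsimp only
  rw [foldA_spec, pyAccumulate_spec]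
  have hf : ((fun p => PySem.List.pyGetD p 0 0) ∘ fun l => (parse_line l).getD [0, 0])
      = Prod.fst ∘ pairOf := by funext l; simp [pairOf]
  have hs : ((fun p => PySem.List.pyGetD p 1 0) ∘ fun l => (parse_line l).getD [0, 0])
      = Prod.snd ∘ pairOf := by funext l; simp [pairOf]
  simp only [List.map_map, List.nil_append, zero_add, hf, hs]
  rw [show data.map (Prod.fst ∘ pairOf) = (data.map pairOf).map Prod.fst from (List.map_map ..).symm,
      show data.map (Prod.snd ∘ pairOf) = (data.map pairOf).map Prod.snd from (List.map_map ..).symm]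
  refine Prod.ext rfl ?_
  simp only [zipSum_spec]
  exact wE_eq_wI _ 0 (by
    intro p hp
    rcases List.mem_map.mp hp with ⟨l, _, rfl⟩
    exact pairOf_mul l)
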